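-- pv_equiv track=rewrite | github.com/Isidore-2001/Jeu_Puissance4 | projet.py | is_align4
-- ===== SOURCE A (Python) =====
-- def nr(g):
--     """
--     """
--     return len(g)
--
-- def nc(g):
--     return len(g[0])
--
-- def is_align4(g,lc,p):
--     i = 0
--
--     while (i<= len(lc)-4):
--            l = lc[i:i+4]
--            l1 = []
--
--            for c in l:
--
--
--                if 0<=c[0] < nr(g) and 0<=c[1] < nc(g):
--                    l1.append(g[c[0]][c[1]]==p )
--
--            if all(l1) and len(l1)==4:
--                 return True
--
--            i+=1
--     return False
-- ===== SOURCE B (Python) =====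
-- def is_align4(g, lc, p):
--     # One pass over lc with a running count of consecutive "good" cells
--     # (in-bounds and holding p); a window of 4 exists iff the count reaches 4.
--     if len(lc) < 4:
--         return False
--     rows = len(g)
--     cols = len(g[0]) if g else 0
--     run = 0
--     for (r, c) in lc:
--         if 0 <= r < rows and 0 <= c < cols and g[r][c] == p:
--             run += 1
--             if run == 4:
--                 return True
--         else:
--             run = 0
--     return False
-- ===== Notes on version B (the rewrite author's own statement) =====
-- stated objective: alternative
-- what changed: Replaces the per-window slice-rebuild-and-check (a fresh 4-slice and list l1 for every start index) by a single pass over lc keeping a running count of consecutive good cells, returning True when the count reaches 4.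
-- outside the precondition, e.g. on is_align4([[5], []], [(0, 0), (0, 0), (0, 0), (0, 0), (1, 0)], 5): A returns True, B returns True
import Mathlib
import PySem

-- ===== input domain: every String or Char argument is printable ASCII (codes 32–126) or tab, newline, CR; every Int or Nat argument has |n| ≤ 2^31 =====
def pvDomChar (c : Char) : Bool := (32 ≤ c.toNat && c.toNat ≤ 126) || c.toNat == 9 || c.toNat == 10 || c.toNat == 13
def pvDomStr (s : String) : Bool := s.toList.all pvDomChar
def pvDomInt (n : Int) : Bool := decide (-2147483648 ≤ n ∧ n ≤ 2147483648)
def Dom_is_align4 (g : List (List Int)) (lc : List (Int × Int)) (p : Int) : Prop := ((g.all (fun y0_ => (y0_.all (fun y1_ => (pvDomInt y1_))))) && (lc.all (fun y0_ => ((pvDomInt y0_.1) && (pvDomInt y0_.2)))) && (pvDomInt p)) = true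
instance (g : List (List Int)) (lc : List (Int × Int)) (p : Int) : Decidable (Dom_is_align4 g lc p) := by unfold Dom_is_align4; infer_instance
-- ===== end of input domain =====

-- B replaces A's per-window slice rebuild by one pass over lc with a running count of
-- consecutive good cells (alternative decomposition; same return value on Pre_).


-- ===== PORT A =====
-- the bounds test `0<=c[0] < nr(g) and 0<=c[1] < nc(g)`; nc(g)=len(g[0]) is only
-- reached when c[0] is in range (short-circuit), so headI is exact there
def pvInbA (g : List (List Int)) (c : Int × Int) : Bool :=
  decide (0 ≤ c.1 ∧ c.1 < (g.length : Int)) && decide (0 ≤ c.2 ∧ c.2 < (g.headI.length : Int))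

-- the while loop of A, i the loop counter (i starts at 0, so a Nat is exact)
def pvALoop (g : List (List Int)) (lc : List (Int × Int)) (p : Int) (i : Nat) : Bool :=
  if h : (i : Int) ≤ (lc.length : Int) - 4 then
    let l := PySem.List.slice lc (some (i : Int)) (some ((i : Int) + 4))
    let l1 := l.foldl (fun acc c =>
      if pvInbA g c then
        acc ++ [PySem.List.pyGetD (PySem.List.pyGetD g c.1 []) c.2 0 == p]
      else acc) []
    if l1.all id && l1.length == 4 then true else pvALoop g lc p (i + 1)
  else false
termination_by lc.length - i
decreasing_by omega

def is_align4 (g : List (List Int)) (lc : List (Int × Int)) (p : Int) : Bool :=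
  pvALoop g lc p 0

-- ===== PORT B =====
def pvBLoop (g : List (List Int)) (p rows cols : Int) : List (Int × Int) → Nat → Bool
  | [], _ => false
  | c :: rest, run =>
    if decide (0 ≤ c.1 ∧ c.1 < rows) && decide (0 ≤ c.2 ∧ c.2 < cols)
         && (PySem.List.pyGetD (PySem.List.pyGetD g c.1 []) c.2 0 == p) then
      if run + 1 = 4 then true else pvBLoop g p rows cols rest (run + 1)
    else pvBLoop g p rows cols rest 0

def is_align4_alt (g : List (List Int)) (lc : List (Int × Int)) (p : Int) : Bool :=
  if lc.length < 4 then false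
  else pvBLoop g p (g.length : Int) (if g.isEmpty then (0 : Int) else (g.headI.length : Int)) lc 0

-- ===== PRECONDITION & SPEC =====
-- Pre_ excludes (when lc has a 4-window at all) ragged grids in which some listed cell is
-- in bounds by row 0's width yet lies beyond its own (shorter) row: there the Python A
-- (and B) can raise IndexError; on some such inputs an earlier complete window makes both
-- return True before reaching the bad cell, so Pre_ is slightly narrower than the raises.
def Pre_is_align4 (g : List (List Int)) (lc : List (Int × Int)) (p : Int) : Prop :=
  4 ≤ lc.length →
    ∀ c ∈ lc, (0 ≤ c.1 ∧ c.1 < (g.length : Int) ∧ 0 ≤ c.2 ∧ c.2 < (g.headI.length : Int)) →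
      c.2.toNat < (g.getD c.1.toNat []).length
instance (g : List (List Int)) (lc : List (Int × Int)) (p : Int) : Decidable (Pre_is_align4 g lc p) := by
  unfold Pre_is_align4; infer_instance

def pvWitness_is_align4 : List (List Int) × (List (Int × Int)) × Int :=
  ([[1, 0], [1, 1]], [((0 : Int), (0 : Int)), (1, 0), (1, 1), (0, 1)], 1)

def Spec_is_align4 (g : List (List Int)) (lc : List (Int × Int)) (p : Int) (out : Bool) : Prop := out = is_align4_alt g lc p
instance (g : List (List Int)) (lc : List (Int × Int)) (p : Int) (out : Bool) : Decidable (Spec_is_align4 g lc p out) := by unfold Spec_is_align4; infer_instance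

-- ===== CLAIM (what is proved, stated in full; the proofs are below) =====
def Claim_equal_is_align4 : Prop := ∀ (g : List (List Int)) (lc : List (Int × Int)) (p : Int), Dom_is_align4 g lc p → Pre_is_align4 g lc p → Spec_is_align4 g lc p (is_align4 g lc p)

-- ===== LEMMAS AND PROOFS =====

-- a cell is "good": in bounds and holding p (both programs test exactly this)
def pvGood (g : List (List Int)) (p : Int) (c : Int × Int) : Bool :=
  pvInbA g c && (PySem.List.pyGetD (PySem.List.pyGetD g c.1 []) c.2 0 == p)

lemma pvCond_eq (g : List (List Int)) (p : Int) (c : Int × Int) :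
    (decide (0 ≤ c.1 ∧ c.1 < (g.length : Int)) && decide (0 ≤ c.2 ∧ c.2 < (g.headI.length : Int))
      && (PySem.List.pyGetD (PySem.List.pyGetD g c.1 []) c.2 0 == p)) = pvGood g p c := rfl

lemma pvFilt (g : List (List Int)) (p : Int) (l : List (Int × Int)) :
    (((l.filter (pvInbA g)).map (fun c => (PySem.List.pyGetD (PySem.List.pyGetD g c.1 []) c.2 0 == p))).all id = true
      ∧ (l.filter (pvInbA g)).length = l.length)
    ↔ l.all (pvGood g p) = true := by
  induction l with
  | nil => simp
  | cons c rest ih =>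
    by_cases hc : pvInbA g c = true
    · simp only [List.filter_cons, hc, if_true, List.map_cons, List.all_cons, id_eq,
        List.length_cons, Nat.add_right_cancel_iff, Bool.and_eq_true, pvGood, Bool.true_and]
      constructor
      · rintro ⟨⟨h1, h2⟩, h3⟩; exact ⟨h1, ih.mp ⟨h2, h3⟩⟩
      · rintro ⟨h1, h2⟩; obtain ⟨h3, h4⟩ := ih.mpr h2; exact ⟨⟨h1, h3⟩, h4⟩
    · have hl := List.length_filter_le (pvInbA g) rest
      have hcf : pvInbA g c = false := by simpa using hc
      constructor
      · rintro ⟨-, h2⟩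
        rw [List.filter_cons, hcf] at h2
        simp only [Bool.false_eq_true, if_false, List.length_cons] at h2
        omega
      · intro hno
        simp [List.all_cons, pvGood, hcf] at hno

lemma pvInner_eq (g : List (List Int)) (p : Int) (l : List (Int × Int)) (hl : l.length = 4) :
    ((l.foldl (fun acc c =>
        if pvInbA g c then
          acc ++ [PySem.List.pyGetD (PySem.List.pyGetD g c.1 []) c.2 0 == p]
        else acc) []).all id
      && (l.foldl (fun acc c =>
        if pvInbA g c then
          acc ++ [PySem.List.pyGetD (PySem.List.pyGetD g c.1 []) c.2 0 == p]
        else acc) []).length == 4) = true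
    ↔ l.all (pvGood g p) = true := by
  rw [PySem.List.foldl_append_if (pvInbA g)
    (fun c => (PySem.List.pyGetD (PySem.List.pyGetD g c.1 []) c.2 0 == p)) l []]
  rw [Bool.and_eq_true, List.nil_append, List.length_map, beq_iff_eq, ← hl]
  exact pvFilt g p l

lemma pvALoop_iff (g : List (List Int)) (lc : List (Int × Int)) (p : Int) :
    ∀ n i, lc.length ≤ i + n →
      (pvALoop g lc p i = true ↔
        ∃ j, i ≤ j ∧ j + 4 ≤ lc.length ∧ ((lc.drop j).take 4).all (pvGood g p) = true) := by
  intro n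
  induction n with
  | zero =>
    intro i hi
    rw [pvALoop, dif_neg (by omega)]
    constructor
    · intro h; exact absurd h (by simp)
    · rintro ⟨j, h1, h2, -⟩; omega
  | succ n ih =>
    intro i hi
    rw [pvALoop]
    by_cases h : (i : Int) ≤ (lc.length : Int) - 4
    · rw [dif_pos h]
      have hi4 : i + 4 ≤ lc.length := by omega
      have hs : PySem.List.slice lc (some (i : Int)) (some ((i : Int) + 4)) = (lc.drop i).take 4 := by
        have h4 := PySem.List.slice_natCast_add lc i 4
        exact_mod_cast h4
      simp only [hs]
      have hwl : ((lc.drop i).take 4).length = 4 := by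
        simp [List.length_take, List.length_drop]; omega
      by_cases hw : ((lc.drop i).take 4).all (pvGood g p) = true
      · rw [if_pos ((pvInner_eq g p _ hwl).mpr hw)]
        exact ⟨fun _ => ⟨i, le_rfl, hi4, hw⟩, fun _ => rfl⟩
      · rw [if_neg (fun hcond => hw ((pvInner_eq g p _ hwl).mp hcond))]
        rw [ih (i + 1) (by omega)]
        constructor
        · rintro ⟨j, h1, h2, h3⟩; exact ⟨j, by omega, h2, h3⟩
        · rintro ⟨j, h1, h2, h3⟩
          rcases Nat.eq_or_lt_of_le h1 with rfl | hlt
          · exact absurd h3 hw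
          · exact ⟨j, by omega, h2, h3⟩
    · rw [dif_neg h]
      constructor
      · intro hh; exact absurd hh (by simp)
      · rintro ⟨j, h1, h2, -⟩; omega

lemma pvTakeMono (l : List (Int × Int)) (q : Int × Int → Bool) (k m : Nat) (hk : k ≤ m)
    (h : (l.take m).all q = true) : (l.take k).all q = true := by
  rw [List.all_eq_true] at *
  intro x hx
  apply h
  have heq : l.take k = (l.take m).take k := by rw [List.take_take, Nat.min_eq_left hk]
  exact List.take_subset _ _ (heq ▸ hx)

lemma pvBLoop_iff (g : List (List Int)) (p : Int) :
    ∀ (l : List (Int × Int)) (run : Nat), run < 4 →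
      (pvBLoop g p (g.length : Int) (g.headI.length : Int) l run = true ↔
        ((4 - run ≤ l.length ∧ (l.take (4 - run)).all (pvGood g p) = true) ∨
          ∃ j, j + 4 ≤ l.length ∧ ((l.drop j).take 4).all (pvGood g p) = true)) := by
  intro l
  induction l with
  | nil =>
    intro run hrun
    simp only [pvBLoop, List.length_nil, List.take_nil, List.all_nil]
    constructor
    · intro h; exact absurd h (by simp)
    · rintro (⟨h1, -⟩ | ⟨j, hj, -⟩) <;> omega
  | cons c rest ih =>
    intro run hrun
    simp only [pvBLoop]
    rw [pvCond_eq]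
    by_cases hc : pvGood g p c = true
    · rw [if_pos hc]
      by_cases hr : run + 1 = 4
      · rw [if_pos hr]
        have h1 : 4 - run = 1 := by omega
        constructor
        · intro _
          left
          constructor
          · rw [h1]; exact Nat.succ_le_succ (Nat.zero_le _)
          · rw [h1, show (1 : Nat) = 0 + 1 from rfl, List.take_succ_cons, List.take_zero,
              List.all_cons, List.all_nil, hc]
            rfl
        · intro _; rfl
      · rw [if_neg hr]
        rw [ih (run + 1) (by omega)]
        have hk : 4 - run = (4 - (run + 1)) + 1 := by omega
        constructor
        · rintro (⟨hlen, hall⟩ | ⟨j, hj, hall⟩)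
          · left
            refine ⟨?_, ?_⟩
            · simp only [List.length_cons]; omega
            · rw [hk, List.take_succ_cons, List.all_cons, hc, Bool.true_and]
              exact hall
          · right
            refine ⟨j + 1, ?_, by simpa using hall⟩
            simp only [List.length_cons]; omega
        · rintro (⟨hlen, hall⟩ | ⟨j, hj, hall⟩)
          · left
            rw [hk, List.take_succ_cons, List.all_cons, hc, Bool.true_and] at hall
            simp only [List.length_cons] at hlen
            exact ⟨by omega, hall⟩
          · cases j with
            | zero =>
              rw [List.drop_zero, show (4 : Nat) = 3 + 1 from rfl, List.take_succ_cons,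
                List.all_cons, hc, Bool.true_and] at hall
              simp only [List.length_cons] at hj
              left
              exact ⟨by omega, pvTakeMono rest _ _ 3 (by omega) hall⟩
            | succ j' =>
              right
              refine ⟨j', ?_, by simpa using hall⟩
              simp only [List.length_cons] at hj; omega
    · rw [if_neg hc]
      have hcf : pvGood g p c = false := by simpa using hc
      rw [ih 0 (by omega)]
      constructor
      · rintro (⟨hlen, hall⟩ | ⟨j, hj, hall⟩)
        · right
          refine ⟨1, ?_, by simpa using hall⟩
          simp only [List.length_cons]; omega
        · right
          refine ⟨j + 1, ?_, by simpa using hall⟩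
          simp only [List.length_cons]; omega
      · rintro (⟨hlen, hall⟩ | ⟨j, hj, hall⟩)
        · have hk : 4 - run = (4 - (run + 1)) + 1 := by omega
          rw [hk, List.take_succ_cons, List.all_cons, hcf, Bool.false_and] at hall
          cases hall
        · cases j with
          | zero =>
            rw [List.drop_zero, show (4 : Nat) = 3 + 1 from rfl, List.take_succ_cons,
              List.all_cons, hcf, Bool.false_and] at hall
            cases hall
          | succ j' =>
            right
            refine ⟨j', ?_, by simpa using hall⟩
            simp only [List.length_cons] at hj; omega

-- ===== VERDICT (by name: the statement is the Claim_ definition above) =====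
theorem is_align4_spec : Claim_equal_is_align4 := by
  intro g lc p _ _
  unfold Spec_is_align4 is_align4 is_align4_alt
  rw [Bool.eq_iff_iff]
  by_cases hlen : lc.length < 4
  · rw [if_pos hlen, pvALoop, dif_neg (by omega)]
  · rw [if_neg hlen]
    have hcols : (if g.isEmpty then (0 : Int) else ((g.headI.length : Nat) : Int)) = ((g.headI.length : Nat) : Int) := by
      cases g <;> simp [List.headI]
    rw [hcols]
    rw [pvALoop_iff g lc p lc.length 0 (by omega), pvBLoop_iff g p lc 0 (by omega)]
    constructor
    · rintro ⟨j, -, hj, hall⟩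
      exact Or.inr ⟨j, hj, hall⟩
    · rintro (⟨h1, h2⟩ | ⟨j, hj, hall⟩)
      · exact ⟨0, Nat.zero_le _, by omega, by simpa using h2⟩
      · exact ⟨j, Nat.zero_le _, hj, hall⟩
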